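-- pv_equiv track=rewrite | github.com/7Rocky/phishing-detection | src/scripts/url_features.py | char_repeat
-- ===== SOURCE A (Python) =====
-- def char_repeat(words_raw):
--     repeat = {'2': 0, '3': 0, '4': 0, '5': 0}
--     part = [2, 3, 4, 5]
--
--     for word in words_raw:
--         for char_repeat_count in part:
--             for i in range(len(word) - char_repeat_count + 1):
--                 sub_word = word[i:i + char_repeat_count]
--
--                 if all(x == sub_word[0] for x in sub_word):
--                     repeat[str(char_repeat_count)] += 1
--
--     return sum(list(repeat.values()))
-- ===== SOURCE B (Python) =====
-- def char_repeat(words_raw):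
--     total = 0
--     for word in words_raw:
--         s = word
--         while s:
--             c = s[0]
--             run = 1
--             while run < len(s) and s[run] == c:
--                 run += 1
--             for k in (2, 3, 4, 5):
--                 if run >= k:
--                     total += run - k + 1
--             s = s[run:]
--     return total
-- ===== Notes on version B (the rewrite author's own statement) =====
-- stated objective: faster
-- what changed: Replaces A's four separate sliding-window scans per word (each building a slice and re-checking all its characters) with a single run-length-encoding pass: each maximal run of length L contributes L-k+1 windows for every k in 2..5 with k<=L.
import Mathlib
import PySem

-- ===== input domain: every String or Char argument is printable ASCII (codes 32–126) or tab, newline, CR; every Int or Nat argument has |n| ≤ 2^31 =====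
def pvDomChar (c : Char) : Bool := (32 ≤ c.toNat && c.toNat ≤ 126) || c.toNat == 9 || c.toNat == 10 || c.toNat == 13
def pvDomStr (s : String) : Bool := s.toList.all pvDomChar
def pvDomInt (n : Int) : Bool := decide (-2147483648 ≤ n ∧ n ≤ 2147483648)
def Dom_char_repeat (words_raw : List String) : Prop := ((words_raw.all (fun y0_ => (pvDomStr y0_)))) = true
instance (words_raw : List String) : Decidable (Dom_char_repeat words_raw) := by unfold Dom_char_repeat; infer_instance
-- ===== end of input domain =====

-- B replaces A's four sliding-window scans per word by one run-length-encoding pass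
-- (each maximal run of length L contributes L-k+1 all-equal windows for each k in 2..5 with k <= L); same result.


-- ===== PORT A =====
-- 'all(x == sub_word[0] for x in sub_word)' is ported as 'sub.all (fun x => sub[0]? == some x)';
-- exact: on a nonempty sub it compares every char to sub[0], and sub is never empty here (on an
-- empty sub both the Python generator and the port are vacuously true).
def char_repeat (words_raw : List String) : Int :=
  let rep : PySem.Dict String Int := PySem.Dict.ofList [("2", 0), ("3", 0), ("4", 0), ("5", 0)]
  let part : List Int := [2, 3, 4, 5]
  let rep := words_raw.foldl (fun rep word =>
    part.foldl (fun rep char_repeat_count =>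
      (PySem.List.pyRange 0 (PySem.Str.len word - char_repeat_count + 1) 1).foldl (fun rep i =>
        let sub := PySem.List.slice word.toList (some i) (some (i + char_repeat_count))
        if sub.all (fun x => sub[0]? == some x) then
          rep.modify (PySem.Int.toStr char_repeat_count) 0 (· + 1)
        else rep) rep) rep) rep
  rep.values.sum

-- ===== PORT B =====
-- contribution of one maximal run of length L: 'for k in (2,3,4,5): if run >= k: total += run - k + 1'
def runContribB (L : Int) : Int :=
  [(2 : Int), 3, 4, 5].foldl (fun t k => if k ≤ L then t + (L - k + 1) else t) 0

-- the 'while s:' loop: strip the maximal run at the front, add its contribution, continue on the rest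
def wordLoopB : List Char → Int
  | [] => 0
  | c :: rest =>
      runContribB ((rest.takeWhile (fun x => x == c)).length + 1) +
        wordLoopB (rest.dropWhile (fun x => x == c))
  termination_by cs => cs.length
  decreasing_by
    simp only [List.length_cons]
    exact Nat.lt_succ_of_le (List.length_dropWhile_le _ _)

def char_repeat_alt (words_raw : List String) : Int :=
  words_raw.foldl (fun total word => total + wordLoopB word.toList) 0

-- ===== PRECONDITION & SPEC =====
def Spec_char_repeat (words_raw : List String) (out : Int) : Prop := out = char_repeat_alt words_raw
instance (words_raw : List String) (out : Int) : Decidable (Spec_char_repeat words_raw out) := by unfold Spec_char_repeat; infer_instance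

-- ===== CLAIM (what is proved, stated in full; the proofs are below) =====
def Claim_equal_char_repeat : Prop := ∀ (words_raw : List String), Dom_char_repeat words_raw → Spec_char_repeat words_raw (char_repeat words_raw)

-- ===== LEMMAS AND PROOFS =====

-- the literal dict {'2': a, '3': b, '4': c, '5': d}
def mkD (a b c d : Int) : PySem.Dict String Int :=
  PySem.Dict.mk [("2", a), ("3", b), ("4", c), ("5", d)]

-- A's window test at offset i for window width kk
def predA (cs : List Char) (kk : Int) (i : Int) : Bool :=
  let sub := PySem.List.slice cs (some i) (some (i + kk))
  sub.all (fun x => sub[0]? == some x)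

-- number of all-equal windows of width k (head-recursion characterisation)
def W (k : Nat) : List Char → Int
  | [] => 0
  | c :: rest =>
      (if k ≤ rest.length + 1 ∧ (List.take k (c :: rest)).all (fun x => c == x) then 1 else 0) + W k rest

theorem mkD_modify2 (a b c d : Int) : (mkD a b c d).modify "2" 0 (· + 1) = mkD (a + 1) b c d := rfl
theorem mkD_modify3 (a b c d : Int) : (mkD a b c d).modify "3" 0 (· + 1) = mkD a (b + 1) c d := rfl
theorem mkD_modify4 (a b c d : Int) : (mkD a b c d).modify "4" 0 (· + 1) = mkD a b (c + 1) d := rfl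
theorem mkD_modify5 (a b c d : Int) : (mkD a b c d).modify "5" 0 (· + 1) = mkD a b c (d + 1) := rfl

theorem innerFold2 (w : String) : ∀ (l : List Int) (a b c d : Int),
    List.foldl (fun rep i =>
        let sub := PySem.List.slice w.toList (some i) (some (i + 2))
        if sub.all (fun x => sub[0]? == some x) then
          rep.modify (PySem.Int.toStr 2) 0 (· + 1)
        else rep) (mkD a b c d) l
      = mkD (a + (l.countP (predA w.toList 2) : Int)) b c d := by
  intro l
  induction l with
  | nil => intro a b c d; simp
  | cons x xs ih =>
      intro a b c d
      have hinit : (let sub := PySem.List.slice w.toList (some x) (some (x + 2));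
            if (sub.all fun x => sub[0]? == some x) then
              (mkD a b c d).modify (PySem.Int.toStr 2) 0 (· + 1)
            else mkD a b c d)
          = if predA w.toList 2 x then mkD (a + 1) b c d else mkD a b c d := by
        rw [← mkD_modify2]; rfl
      rw [List.foldl_cons, List.countP_cons, hinit]
      by_cases hx : predA w.toList 2 x = true
      · rw [if_pos hx, ih, hx]
        congr 1
        simp
        omega
      · rw [if_neg hx, ih]
        simp [hx]

theorem innerFold3 (w : String) : ∀ (l : List Int) (a b c d : Int),
    List.foldl (fun rep i =>
        let sub := PySem.List.slice w.toList (some i) (some (i + 3))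
        if sub.all (fun x => sub[0]? == some x) then
          rep.modify (PySem.Int.toStr 3) 0 (· + 1)
        else rep) (mkD a b c d) l
      = mkD a (b + (l.countP (predA w.toList 3) : Int)) c d := by
  intro l
  induction l with
  | nil => intro a b c d; simp
  | cons x xs ih =>
      intro a b c d
      have hinit : (let sub := PySem.List.slice w.toList (some x) (some (x + 3));
            if (sub.all fun x => sub[0]? == some x) then
              (mkD a b c d).modify (PySem.Int.toStr 3) 0 (· + 1)
            else mkD a b c d)
          = if predA w.toList 3 x then mkD a (b + 1) c d else mkD a b c d := by
        rw [← mkD_modify3]; rfl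
      rw [List.foldl_cons, List.countP_cons, hinit]
      by_cases hx : predA w.toList 3 x = true
      · rw [if_pos hx, ih, hx]
        congr 1
        simp
        omega
      · rw [if_neg hx, ih]
        simp [hx]

theorem innerFold4 (w : String) : ∀ (l : List Int) (a b c d : Int),
    List.foldl (fun rep i =>
        let sub := PySem.List.slice w.toList (some i) (some (i + 4))
        if sub.all (fun x => sub[0]? == some x) then
          rep.modify (PySem.Int.toStr 4) 0 (· + 1)
        else rep) (mkD a b c d) l
      = mkD a b (c + (l.countP (predA w.toList 4) : Int)) d := by
  intro l
  induction l with
  | nil => intro a b c d; simp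
  | cons x xs ih =>
      intro a b c d
      have hinit : (let sub := PySem.List.slice w.toList (some x) (some (x + 4));
            if (sub.all fun x => sub[0]? == some x) then
              (mkD a b c d).modify (PySem.Int.toStr 4) 0 (· + 1)
            else mkD a b c d)
          = if predA w.toList 4 x then mkD a b (c + 1) d else mkD a b c d := by
        rw [← mkD_modify4]; rfl
      rw [List.foldl_cons, List.countP_cons, hinit]
      by_cases hx : predA w.toList 4 x = true
      · rw [if_pos hx, ih, hx]
        congr 1
        simp
        omega
      · rw [if_neg hx, ih]
        simp [hx]

theorem innerFold5 (w : String) : ∀ (l : List Int) (a b c d : Int),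
    List.foldl (fun rep i =>
        let sub := PySem.List.slice w.toList (some i) (some (i + 5))
        if sub.all (fun x => sub[0]? == some x) then
          rep.modify (PySem.Int.toStr 5) 0 (· + 1)
        else rep) (mkD a b c d) l
      = mkD a b c (d + (l.countP (predA w.toList 5) : Int)) := by
  intro l
  induction l with
  | nil => intro a b c d; simp
  | cons x xs ih =>
      intro a b c d
      have hinit : (let sub := PySem.List.slice w.toList (some x) (some (x + 5));
            if (sub.all fun x => sub[0]? == some x) then
              (mkD a b c d).modify (PySem.Int.toStr 5) 0 (· + 1)
            else mkD a b c d)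
          = if predA w.toList 5 x then mkD a b c (d + 1) else mkD a b c d := by
        rw [← mkD_modify5]; rfl
      rw [List.foldl_cons, List.countP_cons, hinit]
      by_cases hx : predA w.toList 5 x = true
      · rw [if_pos hx, ih, hx]
        congr 1
        simp
        omega
      · rw [if_neg hx, ih]
        simp [hx]

theorem W_zero_of_lt (k : Nat) : ∀ (cs : List Char), cs.length < k → W k cs = 0 := by
  intro cs
  induction cs with
  | nil => intro _; rfl
  | cons c rest ih =>
      intro h
      simp only [List.length_cons] at h
      rw [W, ih (by omega), if_neg (by simp; omega)]
      ring

theorem predA_succ (c : Char) (rest : List Char) (k j : Nat) :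
    predA (c :: rest) (k : Int) ((j + 1 : Nat) : Int) = predA rest (k : Int) (j : Int) := by
  unfold predA
  rw [PySem.List.slice_natCast_add, PySem.List.slice_natCast_add, List.drop_succ_cons]

theorem predA_zero (c : Char) (rest : List Char) (k' : Nat) :
    predA (c :: rest) ((k' + 1 : Nat) : Int) ((0 : Nat) : Int)
      = (List.take (k' + 1) (c :: rest)).all (fun x => c == x) := by
  unfold predA
  rw [PySem.List.slice_natCast_add, List.drop_zero, List.take_succ_cons]
  simp

theorem countA_range (k : Nat) (hk : 1 ≤ k) :
    ∀ (cs : List Char),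
      (((List.range (cs.length + 1 - k)).countP (fun (j : Nat) => predA cs (k : Int) (j : Int))) : Int)
        = W k cs := by
  intro cs
  induction cs with
  | nil =>
      simp only [List.length_nil]
      rw [show (0 + 1 - k) = 0 by omega]
      rfl
  | cons c rest ih =>
      by_cases hle : k ≤ rest.length + 1
      · rw [show (c :: rest).length + 1 - k = (rest.length + 1 - k) + 1 by simp; omega]
        rw [List.range_succ_eq_map, List.countP_cons, List.countP_map]
        have htail : (fun (j : Nat) => predA (c :: rest) (k : Int) (j : Int)) ∘ Nat.succ
            = (fun (j : Nat) => predA rest (k : Int) (j : Int)) := by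
          funext j
          simp only [Function.comp_apply, Nat.succ_eq_add_one]
          exact predA_succ c rest k j
        rw [htail, Nat.cast_add, ih, apply_ite (Nat.cast : Nat → Int), W]
        obtain ⟨k', rfl⟩ : ∃ k', k = k' + 1 := ⟨k - 1, by omega⟩
        rw [predA_zero]
        by_cases hall : (List.take (k' + 1) (c :: rest)).all (fun x => c == x) = true
        · rw [if_pos hall, if_pos ⟨hle, hall⟩]; ring
        · rw [if_neg hall, if_neg (by rintro ⟨-, h⟩; exact hall h)]; ring
      · rw [show (c :: rest).length + 1 - k = 0 by simp; omega]
        rw [W, W_zero_of_lt k rest (by omega), if_neg (by simp; omega)]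
        rfl

theorem countA_eq_W (k : Nat) (hk : 1 ≤ k) (cs : List Char) :
    ((PySem.List.pyRange 0 ((cs.length : Int) - (k : Int) + 1) 1).countP (predA cs (k : Int)) : Int)
      = W k cs := by
  rw [PySem.List.pyRange_one, List.countP_map]
  rw [show ((cs.length : Int) - (k : Int) + 1 - 0).toNat = cs.length + 1 - k by omega]
  rw [show (predA cs (k : Int) ∘ fun kk : Nat => (0 : Int) + (kk : Int))
        = (fun (j : Nat) => predA cs (k : Int) (j : Int)) by funext j; simp]
  exact countA_range k hk cs

theorem W_replicate (k : Nat) (hk : 1 ≤ k) (c : Char) (t : List Char)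
    (ht : ∀ d ∈ t.head?, (c == d) = false) :
    ∀ (L : Nat), W k (List.replicate L c ++ t)
      = (if k ≤ L then (L : Int) - (k : Int) + 1 else 0) + W k t := by
  intro L
  induction L with
  | zero => rw [if_neg (by omega)]; simp
  | succ L ih =>
      rw [List.replicate_succ, List.cons_append, W, ih]
      have hind : (if k ≤ (List.replicate L c ++ t).length + 1 ∧
          (List.take k (c :: (List.replicate L c ++ t))).all (fun x => c == x) then (1:Int) else 0)
          = if k ≤ L + 1 then 1 else 0 := by
        by_cases hkL : k ≤ L + 1
        · rw [if_pos hkL, if_pos]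
          constructor
          · simp; omega
          · rw [show c :: (List.replicate L c ++ t) = List.replicate (L + 1) c ++ t by
                simp [List.replicate_succ]]
            rw [List.take_append_of_le_length (by simp; omega), List.all_eq_true]
            intro x hx
            have := List.eq_of_mem_replicate (List.mem_of_mem_take hx)
            simp [this]
        · rw [if_neg hkL, if_neg]
          rintro ⟨hlen, hall⟩
          -- k > L + 1 and k ≤ (L + t.length) + 1, so position L + 1 of the window is t.head ≠ c
          rw [show c :: (List.replicate L c ++ t) = List.replicate (L + 1) c ++ t by
              simp [List.replicate_succ]] at hall
          obtain ⟨d, t', rfl⟩ : ∃ d t', t = d :: t' := by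
            cases t with
            | nil => simp at hlen; omega
            | cons d t' => exact ⟨d, t', rfl⟩
          have hd : d ∈ List.take k (List.replicate (L + 1) c ++ d :: t') := by
            rw [List.mem_take_iff_getElem]
            refine ⟨L + 1, ?_, ?_⟩
            · simp at hlen ⊢; omega
            · rw [List.getElem_append_right (by simp)]
              simp
          rw [List.all_eq_true] at hall
          have := hall d hd
          rw [ht d rfl] at this
          exact absurd this (by simp)
      rw [hind]
      by_cases hkL : k ≤ L + 1 <;> by_cases hkL' : k ≤ L <;>
        simp [hkL, hkL'] <;> omega

theorem word_eq : ∀ (cs : List Char), W 2 cs + W 3 cs + W 4 cs + W 5 cs = wordLoopB cs := by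
  intro cs
  induction cs using wordLoopB.induct with
  | case1 => simp [W, wordLoopB]
  | case2 c rest ih =>
      have hrun : rest.takeWhile (fun x => x == c)
          = List.replicate (rest.takeWhile (fun x => x == c)).length c := by
        apply List.eq_replicate_of_mem
        intro b hb
        exact eq_of_beq (List.mem_takeWhile_imp (p := fun x => x == c) hb)
      have hsplit : c :: rest
          = List.replicate ((rest.takeWhile (fun x => x == c)).length + 1) c
              ++ rest.dropWhile (fun x => x == c) := by
        rw [List.replicate_succ, List.cons_append]
        nth_rewrite 1 [← List.takeWhile_append_dropWhile (p := fun x => x == c) (l := rest)]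
        rw [← hrun]
      have ht : ∀ d ∈ (rest.dropWhile (fun x => x == c)).head?, (c == d) = false := by
        intro d hd
        have h2 := List.head?_dropWhile_not (fun x => x == c) rest
        rw [Option.mem_def] at hd
        rw [hd] at h2
        simp only at h2
        exact beq_eq_false_iff_ne.mpr (Ne.symm (beq_eq_false_iff_ne.mp h2))
      rw [wordLoopB]
      rw [hsplit, W_replicate 2 (by omega) c _ ht, W_replicate 3 (by omega) c _ ht,
        W_replicate 4 (by omega) c _ ht, W_replicate 5 (by omega) c _ ht]
      rw [← ih]
      have hcond : ∀ kk : Nat, (kk ≤ (List.takeWhile (fun x => x == c) rest).length + 1)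
          ↔ ((kk : Int) ≤ ((List.takeWhile (fun x => x == c) rest).length : Int) + 1) :=
        fun kk => by omega
      simp only [runContribB, List.foldl, hcond]
      push_cast
      split_ifs <;> omega

theorem cntW (k : Nat) (hk : 1 ≤ k) (kI : Int) (hkI : kI = (k : Int)) (w : String) :
    ((PySem.List.pyRange 0 (PySem.Str.len w - kI + 1) 1).countP (predA w.toList kI) : Int)
      = W k w.toList := by
  subst hkI
  rw [PySem.Str.len_eq]
  exact countA_eq_W k hk w.toList

theorem stepA (w : String) (a b c d : Int) :
    List.foldl (fun rep char_repeat_count =>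
      (PySem.List.pyRange 0 (PySem.Str.len w - char_repeat_count + 1) 1).foldl (fun rep i =>
        let sub := PySem.List.slice w.toList (some i) (some (i + char_repeat_count))
        if sub.all (fun x => sub[0]? == some x) then
          rep.modify (PySem.Int.toStr char_repeat_count) 0 (· + 1)
        else rep) rep) (mkD a b c d) [2, 3, 4, 5]
    = mkD (a + W 2 w.toList) (b + W 3 w.toList) (c + W 4 w.toList) (d + W 5 w.toList) := by
  rw [List.foldl_cons, List.foldl_cons, List.foldl_cons, List.foldl_cons, List.foldl_nil]
  rw [innerFold2, innerFold3, innerFold4, innerFold5]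
  rw [cntW 2 (by omega) 2 (by norm_num) w, cntW 3 (by omega) 3 (by norm_num) w,
    cntW 4 (by omega) 4 (by norm_num) w, cntW 5 (by omega) 5 (by norm_num) w]

theorem foldWords (ws : List String) : ∀ a b c d : Int,
    List.foldl (fun rep word =>
      List.foldl (fun rep char_repeat_count =>
        (PySem.List.pyRange 0 (PySem.Str.len word - char_repeat_count + 1) 1).foldl (fun rep i =>
          let sub := PySem.List.slice word.toList (some i) (some (i + char_repeat_count))
          if sub.all (fun x => sub[0]? == some x) then
            rep.modify (PySem.Int.toStr char_repeat_count) 0 (· + 1)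
          else rep) rep) rep [2, 3, 4, 5]) (mkD a b c d) ws
    = mkD (a + (ws.map (fun w => W 2 w.toList)).sum) (b + (ws.map (fun w => W 3 w.toList)).sum)
        (c + (ws.map (fun w => W 4 w.toList)).sum) (d + (ws.map (fun w => W 5 w.toList)).sum) := by
  induction ws with
  | nil => intro a b c d; simp
  | cons w ws ih =>
      intro a b c d
      rw [List.foldl_cons, stepA, ih]
      simp only [List.map_cons, List.sum_cons]
      congr 1 <;> ring

-- ===== VERDICT (by name: the statement is the Claim_ definition above) =====
theorem char_repeat_spec : Claim_equal_char_repeat := by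
  intro ws _
  unfold Spec_char_repeat
  dsimp only [char_repeat, char_repeat_alt]
  rw [show PySem.Dict.ofList [("2", (0:Int)), ("3", 0), ("4", 0), ("5", 0)] = mkD 0 0 0 0 from rfl]
  rw [foldWords]
  rw [PySem.List.foldl_add ws (fun w => wordLoopB w.toList) 0]
  rw [show ws.map (fun w => wordLoopB w.toList)
      = ws.map (fun w => W 2 w.toList + W 3 w.toList + W 4 w.toList + W 5 w.toList) from
    List.map_congr_left (fun w _ => (word_eq w.toList).symm)]
  simp [mkD, PySem.Dict.values_mk]
  ring
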